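-- pv_equiv track=rewrite | github.com/SamVanderstraeten/aoc21 | 19.py | map_beacons
-- ===== SOURCE A (Python) =====
-- def map_beacons(beacons_b, vector, overlapping_pair):
--     mapped_beacons = [[0,0,0] for i in range(len(beacons_b))]
--     for ia,a in enumerate(overlapping_pair[0]):
--         for ib,b in enumerate(overlapping_pair[1]):
--             for i in [-1,1]:
--                 if a-i*b == vector[ia]:
--                     for index,beacon in enumerate(beacons_b):
--                         mapped_beacons[index][ia] = vector[ia]+i*beacon[ib]
--     return [tuple(b) for b in mapped_beacons]
-- ===== SOURCE B (Python) =====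
-- def map_beacons(beacons_b, vector, overlapping_pair):
--     # build an axis-mapping table once (last match wins), then one pass over beacons
--     mapping = {}
--     for ia, a in enumerate(overlapping_pair[0]):
--         for ib, b in enumerate(overlapping_pair[1]):
--             for i in [-1, 1]:
--                 if a - i * b == vector[ia]:
--                     mapping[ia] = (ib, i)
--     out = []
--     for beacon in beacons_b:
--         row = []
--         for j in range(3):
--             if j in mapping:
--                 ib, i = mapping[j]
--                 row.append(vector[j] + i * beacon[ib])
--             else:
--                 row.append(0)
--         out.append(tuple(row))
--     return out
-- ===== Notes on version B (the rewrite author's own statement) =====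
-- stated objective: alternative
-- what changed: A rescans and rewrites the whole beacon list once per matching (axis, axis, sign) triple; B instead builds an axis-mapping table (last match wins) from the candidate triples and then produces each output row in a single pass over the beacons.
import Mathlib
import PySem

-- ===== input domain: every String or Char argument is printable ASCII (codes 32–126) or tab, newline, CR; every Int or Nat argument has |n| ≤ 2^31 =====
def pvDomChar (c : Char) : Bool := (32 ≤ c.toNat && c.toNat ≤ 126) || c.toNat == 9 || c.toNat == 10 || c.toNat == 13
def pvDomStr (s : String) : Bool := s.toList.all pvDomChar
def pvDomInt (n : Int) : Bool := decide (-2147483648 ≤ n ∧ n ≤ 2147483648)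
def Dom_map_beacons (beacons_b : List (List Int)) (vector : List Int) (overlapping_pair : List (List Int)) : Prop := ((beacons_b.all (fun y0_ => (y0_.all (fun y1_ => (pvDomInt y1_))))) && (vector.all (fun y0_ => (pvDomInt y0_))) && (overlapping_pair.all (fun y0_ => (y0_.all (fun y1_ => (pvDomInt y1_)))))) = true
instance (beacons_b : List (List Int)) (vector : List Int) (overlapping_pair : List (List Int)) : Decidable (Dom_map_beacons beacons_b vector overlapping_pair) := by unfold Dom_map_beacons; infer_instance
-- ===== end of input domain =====

-- B replaces A's per-match rescans of the whole beacon list by one axis-mapping table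
-- (last match wins) followed by a single pass over the beacons (objective: alternative).

-- ===== PORT A =====
-- literal port of A; Python tuples are Lean lists, so `[tuple(b) for b in mapped]` is a map of the identity
def map_beacons (beacons_b : List (List Int)) (vector : List Int) (overlapping_pair : List (List Int)) : List (List Int) :=
  let mapped0 : List (List Int) := (List.range beacons_b.length).map (fun _ => [0, 0, 0])
  let mapped :=
    (PySem.List.enumerate (PySem.List.pyGetD overlapping_pair 0 []) 0).foldl (fun m pa =>
      (PySem.List.enumerate (PySem.List.pyGetD overlapping_pair 1 []) 0).foldl (fun m pb =>
        ([-1, 1] : List Int).foldl (fun m i =>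
          if pa.2 - i * pb.2 = PySem.List.pyGetD vector pa.1 0 then
            (PySem.List.enumerate beacons_b 0).foldl (fun m p =>
              m.set p.1.toNat ((m.getD p.1.toNat []).set pa.1.toNat
                (PySem.List.pyGetD vector pa.1 0 + i * PySem.List.pyGetD p.2 pb.1 0))) m
          else m) m) m) mapped0
  mapped.map (fun b => b)

-- ===== PORT B =====
-- literal port of Source B: build the axis table `mapping`, then one pass over beacons_b
def map_beacons_alt (beacons_b : List (List Int)) (vector : List Int) (overlapping_pair : List (List Int)) : List (List Int) :=
  let mapping : PySem.Dict Int (Int × Int) :=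
    (PySem.List.enumerate (PySem.List.pyGetD overlapping_pair 0 []) 0).foldl (fun d pa =>
      (PySem.List.enumerate (PySem.List.pyGetD overlapping_pair 1 []) 0).foldl (fun d pb =>
        ([-1, 1] : List Int).foldl (fun d i =>
          if pa.2 - i * pb.2 = PySem.List.pyGetD vector pa.1 0 then d.insert pa.1 (pb.1, i)
          else d) d) d) PySem.Dict.empty
  beacons_b.foldl (fun out beacon =>
    out ++ [(PySem.List.pyRange 0 3 1).foldl (fun row j =>
      row ++ [if mapping.contains j then
                PySem.List.pyGetD vector j 0 +
                  (mapping.getD j (0, 0)).2 * PySem.List.pyGetD beacon (mapping.getD j (0, 0)).1 0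
              else 0]) []]) []

-- ===== PRECONDITION & SPEC =====
-- Pre_ excludes exactly the inputs on which A raises an IndexError (missing overlapping_pair
-- rows, a vector shorter than overlapping_pair[0], or a match whose axis/beacon index is out
-- of range); A returns on every input satisfying Pre_.
def Pre_map_beacons (beacons_b : List (List Int)) (vector : List Int) (overlapping_pair : List (List Int)) : Prop :=
  overlapping_pair ≠ [] ∧
  (overlapping_pair.getD 0 [] ≠ [] →
    (2 ≤ overlapping_pair.length ∧
     (overlapping_pair.getD 1 [] ≠ [] → (overlapping_pair.getD 0 []).length ≤ vector.length) ∧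
     ∀ ia < (overlapping_pair.getD 0 []).length, ∀ ib < (overlapping_pair.getD 1 []).length,
       ∀ i ∈ ([-1, 1] : List Int),
         (overlapping_pair.getD 0 []).getD ia 0 - i * (overlapping_pair.getD 1 []).getD ib 0
             = vector.getD ia 0 →
           ((beacons_b ≠ [] → ia < 3) ∧ ∀ beacon ∈ beacons_b, ib < beacon.length)))
instance (beacons_b : List (List Int)) (vector : List Int) (overlapping_pair : List (List Int)) : Decidable (Pre_map_beacons beacons_b vector overlapping_pair) := by unfold Pre_map_beacons; infer_instance

def pvWitness_map_beacons : List (List Int) × List Int × List (List Int) :=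
  ([[1, 2, 3]], [4, 5, 6], [[1, 2, 3], [1, 2, 3]])

def Spec_map_beacons (beacons_b : List (List Int)) (vector : List Int) (overlapping_pair : List (List Int)) (out : List (List Int)) : Prop := out = map_beacons_alt beacons_b vector overlapping_pair
instance (beacons_b : List (List Int)) (vector : List Int) (overlapping_pair : List (List Int)) (out : List (List Int)) : Decidable (Spec_map_beacons beacons_b vector overlapping_pair out) := by unfold Spec_map_beacons; infer_instance

-- ===== CLAIM (what is proved, stated in full; the proofs are below) =====
def Claim_equal_map_beacons : Prop := ∀ (beacons_b : List (List Int)) (vector : List Int) (overlapping_pair : List (List Int)), Dom_map_beacons beacons_b vector overlapping_pair → Pre_map_beacons beacons_b vector overlapping_pair → Spec_map_beacons beacons_b vector overlapping_pair (map_beacons beacons_b vector overlapping_pair)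

-- ===== LEMMAS AND PROOFS =====

-- a triple (ia, a, ib, b, i) of the three nested loops
def pvBigStep (beacons_b : List (List Int)) (v : List Int)
    (m : List (List Int)) (t : Int × Int × Int × Int × Int) : List (List Int) :=
  if t.2.1 - t.2.2.2.2 * t.2.2.2.1 = PySem.List.pyGetD v t.1 0 then
    (PySem.List.enumerate beacons_b 0).foldl (fun m p =>
      m.set p.1.toNat ((m.getD p.1.toNat []).set t.1.toNat
        (PySem.List.pyGetD v t.1 0 + t.2.2.2.2 * PySem.List.pyGetD p.2 t.2.2.1 0))) m
  else m

def pvRowStep (v beacon : List Int) (row : List Int) (t : Int × Int × Int × Int × Int) : List Int :=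
  if t.2.1 - t.2.2.2.2 * t.2.2.2.1 = PySem.List.pyGetD v t.1 0 then
    row.set t.1.toNat (PySem.List.pyGetD v t.1 0 + t.2.2.2.2 * PySem.List.pyGetD beacon t.2.2.1 0)
  else row

def pvDictStep (v : List Int) (d : PySem.Dict Int (Int × Int)) (t : Int × Int × Int × Int × Int) : PySem.Dict Int (Int × Int) :=
  if t.2.1 - t.2.2.2.2 * t.2.2.2.1 = PySem.List.pyGetD v t.1 0 then d.insert t.1 (t.2.2.1, t.2.2.2.2)
  else d

def pvInterp (v beacon : List Int) (d : PySem.Dict Int (Int × Int)) (j : Int) : Int :=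
  if d.contains j then
    PySem.List.pyGetD v j 0 + (d.getD j (0, 0)).2 * PySem.List.pyGetD beacon (d.getD j (0, 0)).1 0
  else 0

def pvTriples (p0 p1 : List Int) : List (Int × Int × Int × Int × Int) :=
  (PySem.List.enumerate p0 0).flatMap (fun pa =>
    (PySem.List.enumerate p1 0).flatMap (fun pb =>
      ([-1, 1] : List Int).map (fun i => (pa.1, pa.2, pb.1, pb.2, i))))

theorem pvFoldl3 {σ : Type} (f : σ → (Int × Int × Int × Int × Int) → σ) (p0 p1 : List Int) (s : σ) :
    (PySem.List.enumerate p0 0).foldl (fun m pa =>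
      (PySem.List.enumerate p1 0).foldl (fun m pb =>
        ([-1, 1] : List Int).foldl (fun m i => f m (pa.1, pa.2, pb.1, pb.2, i)) m) m) s
    = (pvTriples p0 p1).foldl f s := by
  simp [pvTriples, List.foldl_flatMap]

theorem pvMemTriples_nonneg (p0 p1 : List Int) (t : Int × Int × Int × Int × Int)
    (ht : t ∈ pvTriples p0 p1) : 0 ≤ t.1 := by
  simp only [pvTriples, List.mem_flatMap, List.mem_map] at ht
  obtain ⟨pa, hpa, pb, hpb, i, hi, rfl⟩ := ht
  rcases (PySem.List.mem_enumerate_iff _ _ _).1 hpa with ⟨k, hk, rfl⟩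
  simp only []
  omega

theorem pvStepCompat (v beacon : List Int) (d : PySem.Dict Int (Int × Int))
    (t : Int × Int × Int × Int × Int) (ht : 0 ≤ t.1) :
    pvRowStep v beacon [pvInterp v beacon d 0, pvInterp v beacon d 1, pvInterp v beacon d 2] t
    = [pvInterp v beacon (pvDictStep v d t) 0, pvInterp v beacon (pvDictStep v d t) 1,
       pvInterp v beacon (pvDictStep v d t) 2] := by
  unfold pvRowStep pvDictStep
  split_ifs with h
  · obtain h0 | h1 | h2 | h3 : t.1 = 0 ∨ t.1 = 1 ∨ t.1 = 2 ∨ 3 ≤ t.1 := by omega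
    · simp [pvInterp, PySem.Dict.contains_insert, PySem.Dict.getD_insert, h0]
    · simp [pvInterp, PySem.Dict.contains_insert, PySem.Dict.getD_insert, h1]
    · simp [pvInterp, PySem.Dict.contains_insert, PySem.Dict.getD_insert, h2]
    · have hs : ([pvInterp v beacon d 0, pvInterp v beacon d 1, pvInterp v beacon d 2]).set t.1.toNat
          (PySem.List.pyGetD v t.1 0 + t.2.2.2.2 * PySem.List.pyGetD beacon t.2.2.1 0)
          = [pvInterp v beacon d 0, pvInterp v beacon d 1, pvInterp v beacon d 2] :=
        List.set_eq_of_length_le (by simp; omega)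
      rw [hs]
      have h0 : (0 : Int) ≠ t.1 := by omega
      have h1 : (1 : Int) ≠ t.1 := by omega
      have h2 : (2 : Int) ≠ t.1 := by omega
      simp [pvInterp, PySem.Dict.contains_insert, PySem.Dict.getD_insert, h0, h1, h2]
  · rfl

theorem pvRowDict (v beacon : List Int) (T : List (Int × Int × Int × Int × Int))
    (hT : ∀ t ∈ T, 0 ≤ t.1) (d : PySem.Dict Int (Int × Int)) :
    T.foldl (pvRowStep v beacon) [pvInterp v beacon d 0, pvInterp v beacon d 1, pvInterp v beacon d 2]
    = [pvInterp v beacon (T.foldl (pvDictStep v) d) 0,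
       pvInterp v beacon (T.foldl (pvDictStep v) d) 1,
       pvInterp v beacon (T.foldl (pvDictStep v) d) 2] := by
  induction T generalizing d with
  | nil => rfl
  | cons t T ih =>
      simp only [List.foldl_cons]
      rw [pvStepCompat v beacon d t (hT t (by simp))]
      exact ih (fun t' ht' => hT t' (by simp [ht'])) (pvDictStep v d t)

theorem pvSetAll (v : List Int) (ia ib i : Int) (bs' : List (List Int)) :
    ∀ (pre : List (List Int)) (r : List Int → List Int),
    (PySem.List.enumerate bs' (pre.length : Int)).foldl (fun m p =>
        m.set p.1.toNat ((m.getD p.1.toNat []).set ia.toNat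
          (PySem.List.pyGetD v ia 0 + i * PySem.List.pyGetD p.2 ib 0))) (pre ++ bs'.map r)
    = pre ++ bs'.map (fun b => (r b).set ia.toNat
        (PySem.List.pyGetD v ia 0 + i * PySem.List.pyGetD b ib 0)) := by
  induction bs' with
  | nil => intro pre r; simp [PySem.List.enumerate_nil]
  | cons b rest ih =>
      intro pre r
      rw [PySem.List.enumerate_cons, List.foldl_cons]
      have hlen : ((pre.length : Int)).toNat = pre.length := Int.toNat_natCast _
      have hget : (pre ++ r b :: rest.map r).getD pre.length [] = r b := by
        rw [List.getD_eq_getElem?_getD, List.getElem?_append_right (Nat.le_refl _)]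
        simp
      have hset : ∀ x : List Int, (pre ++ r b :: rest.map r).set pre.length x
          = (pre ++ [x]) ++ rest.map r := by
        intro x
        rw [List.set_append_right _ _ (Nat.le_refl _)]
        simp
      simp only [hlen, List.map_cons]
      rw [hget, hset]
      have hc : ((pre.length : Int) + 1)
          = (((pre ++ [(r b).set ia.toNat (PySem.List.pyGetD v ia 0 + i * PySem.List.pyGetD b ib 0)]).length : Int)) := by
        simp
      rw [hc, ih]
      simp

theorem pvMulti (bs : List (List Int)) (v : List Int) (T : List (Int × Int × Int × Int × Int)) :
    ∀ (r : List Int → List Int),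
    T.foldl (pvBigStep bs v) (bs.map r) = bs.map (fun b => T.foldl (pvRowStep v b) (r b)) := by
  induction T with
  | nil => intro r; simp
  | cons t T ih =>
      intro r
      simp only [List.foldl_cons]
      have hstep : pvBigStep bs v (bs.map r) t = bs.map (fun b => pvRowStep v b (r b) t) := by
        unfold pvBigStep pvRowStep
        split_ifs with h
        · simpa using pvSetAll v t.1 t.2.2.1 t.2.2.2.2 bs [] r
        · rfl
      rw [hstep, ih]

-- ===== VERDICT (by name: the statement is the Claim_ definition above) =====
theorem pvInterp_empty (v b : List Int) (j : Int) : pvInterp v b PySem.Dict.empty j = 0 := by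
  simp [pvInterp]

theorem map_beacons_spec : Claim_equal_map_beacons := by
  intro bs v op _ _
  show map_beacons bs v op = map_beacons_alt bs v op
  have hA0 : map_beacons bs v op
      = ((pvTriples (PySem.List.pyGetD op 0 []) (PySem.List.pyGetD op 1 [])).foldl (pvBigStep bs v)
          ((List.range bs.length).map (fun _ => ([0, 0, 0] : List Int)))).map (fun b => b) :=
    congrArg (List.map (fun b => b)) (pvFoldl3 (pvBigStep bs v) _ _ _)
  have hinit : (List.range bs.length).map (fun _ => ([0, 0, 0] : List Int))
      = bs.map (fun _ => ([0, 0, 0] : List Int)) := by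
    simp
  have hA : map_beacons bs v op = bs.map (fun b =>
      [pvInterp v b ((pvTriples (PySem.List.pyGetD op 0 []) (PySem.List.pyGetD op 1 [])).foldl (pvDictStep v) PySem.Dict.empty) 0,
       pvInterp v b ((pvTriples (PySem.List.pyGetD op 0 []) (PySem.List.pyGetD op 1 [])).foldl (pvDictStep v) PySem.Dict.empty) 1,
       pvInterp v b ((pvTriples (PySem.List.pyGetD op 0 []) (PySem.List.pyGetD op 1 [])).foldl (pvDictStep v) PySem.Dict.empty) 2]) := by
    rw [hA0, hinit]
    simp only [List.map_id']
    rw [pvMulti]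
    refine congrArg (fun f => List.map f bs) (funext fun b => ?_)
    have h0 : ([0, 0, 0] : List Int)
        = [pvInterp v b PySem.Dict.empty 0, pvInterp v b PySem.Dict.empty 1, pvInterp v b PySem.Dict.empty 2] := by
      simp [pvInterp_empty]
    rw [h0, pvRowDict v b _ (fun t ht => pvMemTriples_nonneg _ _ t ht)]
  have hB : map_beacons_alt bs v op = bs.foldl (fun out beacon =>
      out ++ [(PySem.List.pyRange 0 3 1).foldl (fun row j =>
        row ++ [pvInterp v beacon ((pvTriples (PySem.List.pyGetD op 0 []) (PySem.List.pyGetD op 1 [])).foldl (pvDictStep v) PySem.Dict.empty) j]) []]) [] := by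
    show bs.foldl (fun out beacon =>
      out ++ [(PySem.List.pyRange 0 3 1).foldl (fun row j =>
        row ++ [pvInterp v beacon
          ((PySem.List.enumerate (PySem.List.pyGetD op 0 []) 0).foldl (fun m pa =>
            (PySem.List.enumerate (PySem.List.pyGetD op 1 []) 0).foldl (fun m pb =>
              ([-1, 1] : List Int).foldl (fun m i => pvDictStep v m (pa.1, pa.2, pb.1, pb.2, i)) m) m)
            PySem.Dict.empty) j]) []]) [] = _
    rw [pvFoldl3 (pvDictStep v) (PySem.List.pyGetD op 0 []) (PySem.List.pyGetD op 1 []) PySem.Dict.empty]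
  rw [hA, hB]
  rw [PySem.List.foldl_append_singleton_eq_map, List.nil_append]
  refine congrArg (fun f => List.map f bs) (funext fun b => ?_)
  have hr : (PySem.List.pyRange 0 3 1) = [0, 1, 2] := by decide
  rw [hr]
  rfl
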